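-- pv_equiv track=rewrite | github.com/mgmasten/ChoreDev_v2 | server/chore_scheduler.py | calculate_chore_instance_pts
-- ===== SOURCE A (Python) =====
-- def calculate_chore_instance_pts(total_pts, number_of_instances):
-- 	if number_of_instances is not 0:
-- 		pts_per_instance = number_of_instances * [total_pts // number_of_instances]
-- 		for i in range(total_pts % number_of_instances):
-- 			pts_per_instance[i] = pts_per_instance[i] + 1
-- 	else:
-- 		pts_per_instance = []
--
-- 	return pts_per_instance
-- ===== SOURCE B (Python) =====
-- def calculate_chore_instance_pts(total_pts, number_of_instances):
--     n = number_of_instances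
--     return [(total_pts + n - 1 - i) // n for i in range(n)]
-- ===== Notes on version B (the rewrite author's own statement) =====
-- stated objective: alternative
-- what changed: Replaces A's build-uniform-list-then-increment-a-prefix loop with a per-index closed form: slot i is computed independently as (total_pts + n - 1 - i) // n (staggered ceiling division), so no remainder, no list mutation and no second pass exist at all.
import Mathlib
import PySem

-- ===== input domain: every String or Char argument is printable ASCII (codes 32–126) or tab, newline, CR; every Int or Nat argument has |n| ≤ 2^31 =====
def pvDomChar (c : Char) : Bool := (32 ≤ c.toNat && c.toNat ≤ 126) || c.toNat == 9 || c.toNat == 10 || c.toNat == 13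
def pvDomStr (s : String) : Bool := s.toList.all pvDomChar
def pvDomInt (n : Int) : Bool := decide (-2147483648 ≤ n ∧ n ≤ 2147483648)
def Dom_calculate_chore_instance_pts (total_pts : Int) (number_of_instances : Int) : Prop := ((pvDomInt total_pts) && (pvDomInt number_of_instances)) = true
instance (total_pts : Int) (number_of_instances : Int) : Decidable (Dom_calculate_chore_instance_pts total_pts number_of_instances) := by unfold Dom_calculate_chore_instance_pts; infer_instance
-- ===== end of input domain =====

-- B computes each slot independently by the staggered-ceiling closed form
-- (total + n - 1 - i) // n, replacing A's build-then-increment-a-prefix loop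
-- (alternative decomposition; same O(n) cost).

-- ===== PORT A =====
-- 'n * [x]' is empty for n ≤ 0, which Int.toNat's clamping reproduces exactly.
-- The in-loop indexing l[i] never raises: 0 ≤ i < total_pts % n ≤ n = length of the list
-- (and for n < 0 the range is empty), so getD/set are exact here.
def calculate_chore_instance_pts (total_pts : Int) (number_of_instances : Int) : List Int :=
  if number_of_instances ≠ 0 then
    let pts_per_instance :=
      List.replicate number_of_instances.toNat
        (PySem.Int.floordiv total_pts number_of_instances)
    (PySem.List.pyRange 0 (PySem.Int.mod total_pts number_of_instances) 1).foldl
      (fun l i => l.set i.toNat (l.getD i.toNat 0 + 1)) pts_per_instance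
  else
    []

-- ===== PORT B =====
def calculate_chore_instance_pts_alt (total_pts : Int) (number_of_instances : Int) : List Int :=
  (PySem.List.pyRange 0 number_of_instances 1).map
    (fun i => PySem.Int.floordiv (total_pts + number_of_instances - 1 - i) number_of_instances)

-- ===== PRECONDITION & SPEC =====
def Spec_calculate_chore_instance_pts (total_pts : Int) (number_of_instances : Int) (out : List Int) : Prop := out = calculate_chore_instance_pts_alt total_pts number_of_instances
instance (total_pts : Int) (number_of_instances : Int) (out : List Int) : Decidable (Spec_calculate_chore_instance_pts total_pts number_of_instances out) := by unfold Spec_calculate_chore_instance_pts; infer_instance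

-- ===== CLAIM =====
def Claim_equal_calculate_chore_instance_pts : Prop := ∀ (total_pts : Int) (number_of_instances : Int), Dom_calculate_chore_instance_pts total_pts number_of_instances → Spec_calculate_chore_instance_pts total_pts number_of_instances (calculate_chore_instance_pts total_pts number_of_instances)

-- ===== LEMMAS AND PROOFS =====

-- One increment step on the two-block state: setting index r turns
-- replicate r (q+1) ++ replicate (n-r) q into replicate (r+1) (q+1) ++ replicate (n-(r+1)) q.
lemma step_two_block (q : Int) (n r : Nat) (hr : r < n) :
    (List.replicate r (q + 1) ++ List.replicate (n - r) q).set r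
      ((List.replicate r (q + 1) ++ List.replicate (n - r) q).getD r 0 + 1)
    = List.replicate (r + 1) (q + 1) ++ List.replicate (n - (r + 1)) q := by
  have hnr : n - r = (n - (r + 1)) + 1 := by omega
  rw [hnr, List.replicate_succ]
  simp [List.getD_eq_getElem?_getD, List.replicate_succ' (n := r)]

-- Folding A's increment loop over range(0, r) on an all-q list of length n (r ≤ n)
-- yields the two-block list.
lemma loop_eq_two_block (q : Int) (n r : Nat) (h : r ≤ n) :
    (PySem.List.pyRange 0 (r : Int) 1).foldl
      (fun l i => l.set i.toNat (l.getD i.toNat 0 + 1)) (List.replicate n q)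
    = List.replicate r (q + 1) ++ List.replicate (n - r) q := by
  induction r with
  | zero => simp
  | succ r ih =>
    have hr : r < n := by omega
    have hsplit : PySem.List.pyRange 0 ((r : Int) + 1) 1
        = PySem.List.pyRange 0 (r : Int) 1 ++ [(r : Int)] :=
      PySem.List.pyRange_one_succ_right (by positivity)
    rw [show ((r + 1 : Nat) : Int) = (r : Int) + 1 from by push_cast; ring,
       hsplit, List.foldl_append, ih (by omega)]
    simpa using step_two_block q n r hr

-- B's per-index closed form also yields the two-block list (n > 0).
lemma map_eq_two_block (t n : Int) (hn : 0 < n) :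
    (PySem.List.pyRange 0 n 1).map
      (fun i => PySem.Int.floordiv (t + n - 1 - i) n)
    = List.replicate (PySem.Int.mod t n).toNat (PySem.Int.floordiv t n + 1)
      ++ List.replicate (n - PySem.Int.mod t n).toNat (PySem.Int.floordiv t n) := by
  have h0 : 0 ≤ PySem.Int.mod t n := PySem.Int.mod_nonneg t hn
  have h1 : PySem.Int.mod t n < n := PySem.Int.mod_lt t hn
  have hqr : PySem.Int.floordiv t n * n + PySem.Int.mod t n = t :=
    PySem.Int.floordiv_mul_add_mod t n
  apply List.ext_getElem
  · simp [PySem.List.length_pyRange_one]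
    omega
  · intro k hk hk'
    have hkn : (k : Int) < n := by
      have := hk
      simp [PySem.List.length_pyRange_one] at this
      omega
    rw [List.getElem_map, PySem.List.getElem_pyRange_one]
    by_cases hkr : k < (PySem.Int.mod t n).toNat
    · rw [List.getElem_append_left (by simpa using hkr), List.getElem_replicate]
      have hkr' : (k : Int) < PySem.Int.mod t n := by omega
      rw [PySem.Int.floordiv_eq_iff_of_pos hn]
      constructor <;> nlinarith [hqr, h0, h1, hkr']
    · rw [List.getElem_append_right (by simpa using hkr), List.getElem_replicate]
      have hge : PySem.Int.mod t n ≤ (k : Int) := by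
        have := Nat.le_of_not_lt hkr
        omega
      rw [PySem.Int.floordiv_eq_iff_of_pos hn]
      constructor <;> nlinarith [hqr, h0, h1, hge, hkn]

-- ===== VERDICT =====
theorem calculate_chore_instance_pts_spec : Claim_equal_calculate_chore_instance_pts := by
  intro tp n _
  unfold Spec_calculate_chore_instance_pts calculate_chore_instance_pts calculate_chore_instance_pts_alt
  rcases lt_trichotomy n 0 with hneg | hz | hpos
  · -- n < 0: A's replicate is empty and the range is empty (mod ≤ 0); B's range is empty too.
    have hmod := PySem.Int.mod_neg_bounds tp hneg
    rw [if_pos (by omega)]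
    rw [PySem.List.pyRange_one_eq_nil (by omega), PySem.List.pyRange_one_eq_nil (by omega)]
    simp [Int.toNat_of_nonpos (by omega : n ≤ 0)]
  · subst hz; simp [PySem.List.pyRange_one_eq_nil]
  · -- n > 0
    have h0 : 0 ≤ PySem.Int.mod tp n := PySem.Int.mod_nonneg tp hpos
    have h1 : PySem.Int.mod tp n < n := PySem.Int.mod_lt tp hpos
    rw [if_pos (by omega), map_eq_two_block tp n hpos]
    have hcast : ((PySem.Int.mod tp n).toNat : Int) = PySem.Int.mod tp n := Int.toNat_of_nonneg h0
    rw [← hcast, loop_eq_two_block _ n.toNat _ (by omega)]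
    congr 2
    omega
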